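-- pv_equiv track=rewrite | github.com/WNjihia/data-structures-and-algorithms | heaps.py | bubbleUp
-- ===== SOURCE A (Python) =====
-- def bubbleUp(values):
--     index = len(values) - 1
--     parentIndex = (index-1) // 2
--
--     while index > 0 and values[index] > values[parentIndex]:
--         values[parentIndex], values[index] = values[index], values[parentIndex]
--         index = parentIndex
--         parentIndex = (index-1) // 2
--     return values
-- ===== SOURCE B (Python) =====
-- def bubbleUp(values):
--     # Path-based sift-up: precompute the ancestor chain of the last slot,
--     # find how far the value climbs, then shift that block down and place it once.
--     if not values:
--         return values
--     last = len(values) - 1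
--     path = []
--     i = last
--     while i > 0:
--         path.append(i)
--         i = (i - 1) // 2
--     path.append(0)
--     val = values[last]
--     k = 0
--     while k + 1 < len(path) and val > values[path[k + 1]]:
--         k += 1
--     for j in range(k):
--         values[path[j]] = values[path[j + 1]]
--     values[path[k]] = val
--     return values
-- ===== Notes on version B (the rewrite author's own statement) =====
-- stated objective: alternative
-- what changed: A sifts up by swapping the element with its parent at every step; B first builds the ancestor-index path of the last slot, counts how far the value climbs, then shifts that block of ancestors down in one pass and places the value once.
import Mathlib
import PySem

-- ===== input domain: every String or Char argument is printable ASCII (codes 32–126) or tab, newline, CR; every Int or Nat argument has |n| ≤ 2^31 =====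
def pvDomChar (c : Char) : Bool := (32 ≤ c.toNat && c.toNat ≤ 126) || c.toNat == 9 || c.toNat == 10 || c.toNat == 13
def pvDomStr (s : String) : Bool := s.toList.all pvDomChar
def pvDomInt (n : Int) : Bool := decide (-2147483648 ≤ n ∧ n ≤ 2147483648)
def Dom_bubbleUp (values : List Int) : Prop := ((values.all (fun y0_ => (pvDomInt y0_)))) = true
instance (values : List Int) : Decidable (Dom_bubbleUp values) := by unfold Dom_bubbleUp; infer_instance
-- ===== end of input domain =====

-- B replaces A's swap-at-a-time sift-up by a path-based one (ancestor chain, climb count,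
-- block shift, single placement); objective: alternative decomposition, same cost.
-- Both Pythons mutate `values` in place and return it; the equivalence proved here is about
-- the returned list (the in-place effect is in fact the same).

-- ===== PORT A =====
-- while loop → recursion on `index`; reads/writes only reach indices 0 ≤ parent < index < length
-- whenever the guard holds, so pyGetD _ _ 0 and List.set _.toNat are exact there.
def bubbleUpLoop (values : List Int) (index : Int) : List Int :=
  let parentIndex := PySem.Int.floordiv (index - 1) 2
  if h : index > 0 ∧ PySem.List.pyGetD values index 0 > PySem.List.pyGetD values parentIndex 0 then
    bubbleUpLoop
      ((values.set parentIndex.toNat (PySem.List.pyGetD values index 0)).set index.toNat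
        (PySem.List.pyGetD values parentIndex 0))
      parentIndex
  else values
termination_by index.toNat
decreasing_by
  have h2 : PySem.Int.floordiv (index - 1) 2 = (index - 1) / 2 :=
    PySem.Int.floordiv_eq_ediv_of_pos (by norm_num)
  simp only [h2]; omega

def bubbleUp (values : List Int) : List Int :=
  bubbleUpLoop values ((values.length : Int) - 1)

-- ===== PORT B =====
-- The indices Python B handles (path entries, k, j) are nonnegative Python ints: represented as
-- Nat (exact on every reachable state); values[path[_]] reads via getD, writes via List.set.
def pathB (i : Nat) : List Nat :=
  if h : i > 0 then i :: pathB ((i - 1) / 2) else [0]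
termination_by i
decreasing_by omega

def climbB (values : List Int) (val : Int) (path : List Nat) (k : Nat) : Nat :=
  if h : k + 1 < path.length ∧ val > values.getD (path.getD (k + 1) 0) 0 then
    climbB values val path (k + 1)
  else k
termination_by path.length - k
decreasing_by omega

def shiftB (path : List Nat) (k : Nat) (values : List Int) : List Int :=
  (List.range k).foldl
    (fun vs j => vs.set (path.getD j 0) (vs.getD (path.getD (j + 1) 0) 0)) values

def bubbleUp_alt (values : List Int) : List Int :=
  if values = [] then values
  else
    let last := values.length - 1
    let path := pathB last
    let val := values.getD last 0
    let k := climbB values val path 0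
    (shiftB path k values).set (path.getD k 0) val

-- ===== PRECONDITION & SPEC =====
def Spec_bubbleUp (values : List Int) (out : List Int) : Prop := out = bubbleUp_alt values
instance (values : List Int) (out : List Int) : Decidable (Spec_bubbleUp values out) := by unfold Spec_bubbleUp; infer_instance

-- ===== CLAIM (what is proved, stated in full; the proofs are below) =====
def Claim_equal_bubbleUp : Prop := ∀ (values : List Int), Dom_bubbleUp values → Spec_bubbleUp values (bubbleUp values)

-- ===== LEMMAS AND PROOFS =====

-- the result of B's core pipeline starting from Nat index i
def bcore (values : List Int) (i : Nat) : List Int :=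
  (shiftB (pathB i) (climbB values (values.getD i 0) (pathB i) 0) values).set
    ((pathB i).getD (climbB values (values.getD i 0) (pathB i) 0) 0) (values.getD i 0)

lemma pathB_zero : pathB 0 = [0] := by rw [pathB]; simp

lemma pathB_pos {i : Nat} (h : 0 < i) : pathB i = i :: pathB ((i - 1) / 2) := by
  rw [pathB]; simp [h]

lemma pathB_getD_zero (i : Nat) : (pathB i).getD 0 0 = i := by
  by_cases h : 0 < i
  · rw [pathB_pos h]; rfl
  · interval_cases i; rw [pathB_zero]; rfl

lemma pathB_ne_nil (i : Nat) : pathB i ≠ [] := by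
  by_cases h : 0 < i
  · rw [pathB_pos h]; simp
  · interval_cases i; rw [pathB_zero]; simp

lemma pathB_le (i : Nat) : ∀ x ∈ pathB i, x ≤ i := by
  induction i using Nat.strong_induction_on with
  | _ i ih =>
    intro x hx
    by_cases h : 0 < i
    · rw [pathB_pos h, List.mem_cons] at hx
      rcases hx with hx | hx
      · omega
      · have := ih ((i - 1) / 2) (by omega) x hx
        omega
    · interval_cases i; rw [pathB_zero] at hx; simpa using hx

lemma pathB_tail_lt (p n : Nat) (h1 : 1 ≤ n) (h2 : n < (pathB p).length) :
    (pathB p).getD n 0 < p := by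
  by_cases hp : 0 < p
  · rw [pathB_pos hp] at h2 ⊢
    cases n with
    | zero => omega
    | succ m =>
      rw [List.getD_cons_succ]
      have hml : m < (pathB ((p - 1) / 2)).length := by
        simpa using h2
      rw [List.getD_eq_getElem _ _ hml]
      have := pathB_le ((p - 1) / 2) _ (List.getElem_mem hml)
      omega
  · interval_cases p
    rw [pathB_zero] at h2
    simp at h2
    omega

lemma climbB_cons (val : Int) (a : Nat) (rest : List Nat) :
    ∀ (d k : Nat), rest.length - k ≤ d →
    ∀ (v w : List Int),
    (∀ n, 1 ≤ n → n < rest.length → v.getD (rest.getD n 0) 0 = w.getD (rest.getD n 0) 0) →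
    climbB v val (a :: rest) (k + 1) = climbB w val rest k + 1 := by
  intro d
  induction d with
  | zero =>
    intro k hk v w hag
    have hL : climbB v val (a :: rest) (k + 1) = k + 1 := by
      rw [climbB]
      rw [dif_neg]
      intro hcon
      have := hcon.1
      simp only [List.length_cons] at this
      omega
    have hR : climbB w val rest k = k := by
      rw [climbB]
      rw [dif_neg]
      intro hcon
      have := hcon.1
      omega
    rw [hL, hR]
  | succ d ih =>
    intro k hk v w hag
    by_cases hl : k + 1 < rest.length
    · have hget : (a :: rest).getD (k + 1 + 1) 0 = rest.getD (k + 1) 0 := List.getD_cons_succ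
      have hv : v.getD (rest.getD (k + 1) 0) 0 = w.getD (rest.getD (k + 1) 0) 0 :=
        hag (k + 1) (by omega) hl
      by_cases hc : val > w.getD (rest.getD (k + 1) 0) 0
      · have hL : climbB v val (a :: rest) (k + 1) = climbB v val (a :: rest) (k + 1 + 1) := by
          rw [climbB]
          rw [dif_pos ⟨by simp only [List.length_cons]; omega, by rw [hget, hv]; exact hc⟩]
        have hR : climbB w val rest k = climbB w val rest (k + 1) := by
          rw [climbB]
          rw [dif_pos ⟨hl, hc⟩]
        rw [hL, hR]
        exact ih (k + 1) (by omega) v w hag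
      · have hL : climbB v val (a :: rest) (k + 1) = k + 1 := by
          rw [climbB]
          rw [dif_neg]
          intro hcon
          exact hc (by rw [hget, hv] at hcon; exact hcon.2)
        have hR : climbB w val rest k = k := by
          rw [climbB]
          rw [dif_neg]
          intro hcon
          exact hc hcon.2
        rw [hL, hR]
    · have hL : climbB v val (a :: rest) (k + 1) = k + 1 := by
        rw [climbB]
        rw [dif_neg]
        intro hcon
        have := hcon.1
        simp only [List.length_cons] at this
        omega
      have hR : climbB w val rest k = k := by
        rw [climbB]
        rw [dif_neg]
        intro hcon
        exact hl hcon.1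
      rw [hL, hR]

lemma getD_set_ne (l : List Int) (a d : Int) {i j : Nat} (h : i ≠ j) :
    (l.set i a).getD j d = l.getD j d := by
  rw [List.getD_eq_getElem?_getD, List.getD_eq_getElem?_getD, List.getElem?_set_ne h]

lemma shiftB_cons (a : Nat) (rest : List Nat) (k : Nat) (values : List Int) :
    shiftB (a :: rest) (k + 1) values =
      shiftB rest k (values.set a (values.getD (rest.getD 0 0) 0)) := by
  unfold shiftB
  rw [List.range_succ_eq_map]
  simp only [List.foldl_cons, List.foldl_map]
  rfl

lemma shiftB_set_cancel (p : Nat) (rest : List Nat) (k : Nat) (W : List Int) (val : Int)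
    (hp0 : rest.getD 0 0 = p) (hq : 0 < k → rest.getD 1 0 ≠ p) :
    (shiftB rest k (W.set p val)).set (rest.getD k 0) val =
      (shiftB rest k W).set (rest.getD k 0) val := by
  cases k with
  | zero =>
    simp only [shiftB, List.range_zero, List.foldl_nil, hp0, List.set_set]
  | succ m =>
    have hq' : rest.getD 1 0 ≠ p := hq (by omega)
    unfold shiftB
    rw [List.range_succ_eq_map]
    simp only [List.foldl_cons]
    congr 1
    simp only [hp0, List.set_set]
    congr 1
    rw [show ((0:Nat) + 1) = 1 from rfl]
    rw [getD_set_ne W val 0 (Ne.symm hq')]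

lemma climbB_singleton (v : List Int) (val : Int) (x : Nat) : climbB v val [x] 0 = 0 := by
  rw [climbB]
  rw [dif_neg]
  intro hcon
  have := hcon.1
  simp at this

lemma bubbleUpLoop_eq_bcore :
    ∀ (i : Nat) (values : List Int), i < values.length →
    bubbleUpLoop values (i : Int) = bcore values i := by
  intro i
  induction i using Nat.strong_induction_on with
  | _ i ih =>
    intro values hlen
    by_cases hi : 0 < i
    · set p : Nat := (i - 1) / 2 with hp
      have hpar : PySem.Int.floordiv ((i : Int) - 1) 2 = (p : Int) := by
        have hcast : ((i : Int) - 1) = ((i - 1 : Nat) : Int) := by omega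
        rw [hcast]
        exact_mod_cast PySem.Int.floordiv_natCast (i - 1) 2
      have hpi : p < i := by omega
      have hplen : p < values.length := by omega
      set val := values.getD i 0 with hval
      set vp := values.getD p 0 with hvp
      have hgi : PySem.List.pyGetD values (i : Int) 0 = val := by
        simp [PySem.List.pyGetD_natCast, hval]
      have hgp : PySem.List.pyGetD values ((p : Nat) : Int) 0 = vp := by
        simp [PySem.List.pyGetD_natCast, hvp]
      rw [bubbleUpLoop]
      simp only [hpar, hgi, hgp, Int.toNat_natCast]
      by_cases hc : val > vp
      · -- swap case
        rw [dif_pos ⟨by exact_mod_cast hi, hc⟩]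
        set W : List Int := values.set i vp with hW
        have hsets : (values.set p val).set i vp = W.set p val := by
          rw [hW, List.set_comm _ _ (by omega : p ≠ i)]
        rw [hsets]
        have hlen' : p < (W.set p val).length := by simp [hW, hplen]
        have hval' : (W.set p val).getD p 0 = val := by
          rw [List.getD_eq_getElem _ _ hlen', List.getElem_set_self]
        have hA := ih p hpi (W.set p val) (by simp [hW]; omega)
        rw [hA]
        unfold bcore
        rw [hval']
        -- values and the swapped list agree strictly below p
        have hagree : ∀ n, 1 ≤ n → n < (pathB p).length →
            values.getD ((pathB p).getD n 0) 0 = (W.set p val).getD ((pathB p).getD n 0) 0 := by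
          intro n hn1 hnl
          have hlt : (pathB p).getD n 0 < p := pathB_tail_lt p n hn1 hnl
          rw [hW, getD_set_ne _ _ _ (show p ≠ (pathB p).getD n 0 by omega),
            getD_set_ne _ _ _ (show i ≠ (pathB p).getD n 0 by omega)]
        set k' : Nat := climbB (W.set p val) val (pathB p) 0 with hk'
        have hclimb : climbB values val (pathB i) 0 = k' + 1 := by
          rw [pathB_pos hi, ← hp]
          have hstep : climbB values val (i :: pathB p) 0 = climbB values val (i :: pathB p) 1 := by
            rw [climbB]
            rw [dif_pos]
            constructor
            · have := pathB_ne_nil p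
              simp only [List.length_cons]
              cases hpb : pathB p with
              | nil => exact absurd hpb this
              | cons x t => simp
            · have : (i :: pathB p).getD (0 + 1) 0 = p := by
                rw [List.getD_cons_succ, pathB_getD_zero]
              rw [this]
              exact hc
          rw [hstep]
          exact climbB_cons val i (pathB p) (pathB p).length 0 (by omega) values (W.set p val) hagree
        have hk'pos : 0 < k' → 0 < p := by
          intro hk0
          by_contra hp0
          have : p = 0 := by omega
          rw [hk', this, pathB_zero, climbB_singleton] at hk0
          omega
        rw [hclimb, pathB_pos hi, ← hp, List.getD_cons_succ, shiftB_cons, pathB_getD_zero, ← hvp, ← hW, ← hval]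
        exact (shiftB_set_cancel p (pathB p) k' W val (pathB_getD_zero p)
          (fun h0 => by
            have hp0 := hk'pos h0
            have : (pathB p).getD 1 0 < p := by
              apply pathB_tail_lt p 1 (by omega)
              rw [pathB_pos hp0]
              have := pathB_ne_nil ((p - 1) / 2)
              simp only [List.length_cons]
              cases hpb : pathB ((p - 1) / 2) with
              | nil => exact absurd hpb this
              | cons x t => simp
            omega))
      · -- stop case
        rw [dif_neg (by tauto)]
        unfold bcore
        have hk : climbB values val (pathB i) 0 = 0 := by
          rw [pathB_pos hi, ← hp, climbB]
          rw [dif_neg]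
          intro hcon
          apply hc
          have hg : (i :: pathB p).getD (0 + 1) 0 = p := by
            rw [List.getD_cons_succ, pathB_getD_zero]
          rw [hg] at hcon
          exact hcon.2
        rw [hk]
        simp only [shiftB, List.range_zero, List.foldl_nil, pathB_getD_zero]
        rw [List.getD_eq_getElem _ _ hlen]
        exact (List.set_getElem_self hlen).symm
    · -- i = 0
      have hi0 : i = 0 := by omega
      subst hi0
      rw [bubbleUpLoop]
      rw [dif_neg (by intro hcon; exact absurd hcon.1 (by norm_num))]
      unfold bcore
      rw [pathB_zero, climbB_singleton]
      simp only [shiftB, List.range_zero, List.foldl_nil]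
      have : ([0] : List Nat).getD 0 0 = 0 := rfl
      rw [this, List.getD_eq_getElem _ _ hlen]
      exact (List.set_getElem_self hlen).symm

-- ===== VERDICT (by name: the statement is the Claim_ definition above) =====
theorem bubbleUp_spec : Claim_equal_bubbleUp := by
  intro values _
  unfold Spec_bubbleUp bubbleUp bubbleUp_alt
  by_cases hnil : values = []
  · subst hnil
    simp only [List.length_nil]
    rw [bubbleUpLoop]
    rw [dif_neg (by intro hcon; have := hcon.1; norm_num at this)]
    simp
  · rw [if_neg hnil]
    have hlen : 0 < values.length := List.length_pos_iff.mpr hnil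
    have hcast : ((values.length : Int) - 1) = ((values.length - 1 : Nat) : Int) := by omega
    rw [hcast, bubbleUpLoop_eq_bcore (values.length - 1) values (by omega)]
    rfl
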